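-- pv_equiv track=rewrite | github.com/pmaddi/euler | problem_105.py | unequal_subsets
-- ===== SOURCE A (Python) =====
-- from itertools import combinations
--
-- def unequal_subsets(lst):
--     st = set()
--     for r in range(1, len(lst) + 1):
--         for c in combinations(lst, r):
--             sm = sum(c)
--             if sm in st:
--                 return False
--             else:
--                 st.add(sm)
--     return True
-- ===== SOURCE B (Python) =====
-- def unequal_subsets(lst):
--     sums = []
--     for x in lst:
--         sums = sums + [x] + [s + x for s in sums]
--     return len(set(sums)) == len(sums)
-- ===== Notes on version B (the rewrite author's own statement) =====
-- stated objective: simpler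
-- what changed: Replaces the size-by-size itertools.combinations enumeration (with per-subset re-summation and an early-exit set) with one incremental doubling pass: each element x extends the list of existing non-empty subset sums by x and s+x, and distinctness is checked once at the end via len(set)==len; B trades A's early exit for this one-pass construction, so it materializes all 2^n-1 sums even when A stops at an early duplicate.
import Mathlib
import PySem

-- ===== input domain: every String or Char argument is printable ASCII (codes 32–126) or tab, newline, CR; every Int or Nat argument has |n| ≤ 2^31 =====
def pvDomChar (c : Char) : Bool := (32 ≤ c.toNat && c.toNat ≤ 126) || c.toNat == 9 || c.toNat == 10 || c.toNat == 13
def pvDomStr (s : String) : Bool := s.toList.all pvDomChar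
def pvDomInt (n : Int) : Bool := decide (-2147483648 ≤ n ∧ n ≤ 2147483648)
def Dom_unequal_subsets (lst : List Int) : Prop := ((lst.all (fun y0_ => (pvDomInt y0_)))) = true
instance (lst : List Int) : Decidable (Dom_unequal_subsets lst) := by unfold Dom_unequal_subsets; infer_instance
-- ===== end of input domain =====

-- B replaces the size-by-size itertools.combinations scan with one incremental doubling pass over
-- the elements, checking distinctness of all non-empty subset sums once at the end (objective: simpler).

-- ===== PORT A =====
-- itertools.combinations(lst, r): index-lexicographic order
def combosA : Nat → List Int → List (List Int)
  | 0, _ => [[]]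
  | _ + 1, [] => []
  | r + 1, x :: xs => (combosA r xs).map (fun c => x :: c) ++ combosA (r + 1) xs

-- the inner 'for c in combinations(lst, r)' loop; none = the 'return False' was taken
def innerA (st : PySem.Set Int) : List (List Int) → Option (PySem.Set Int)
  | [] => some st
  | c :: cs =>
    let sm := c.sum
    if PySem.Set.contains st sm then none
    else innerA (PySem.Set.add st sm) cs

-- the outer 'for r in range(1, len(lst) + 1)' loop
def outerA (lst : List Int) (st : PySem.Set Int) : List Int → Bool
  | [] => true
  | r :: rs =>
    match innerA st (combosA r.toNat lst) with
    | none => false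
    | some st' => outerA lst st' rs

def unequal_subsets (lst : List Int) : Bool :=
  outerA lst PySem.Set.empty (PySem.List.pyRange 1 ((lst.length : Int) + 1) 1)

-- ===== PORT B =====
def bStep (sums : List Int) (x : Int) : List Int :=
  sums ++ [x] ++ sums.map (fun s => s + x)

def unequal_subsets_alt (lst : List Int) : Bool :=
  let sums := lst.foldl bStep []
  PySem.Set.len (PySem.Set.ofList sums) == sums.length

-- ===== PRECONDITION & SPEC =====
def Spec_unequal_subsets (lst : List Int) (out : Bool) : Prop := out = unequal_subsets_alt lst
instance (lst : List Int) (out : Bool) : Decidable (Spec_unequal_subsets lst out) := by unfold Spec_unequal_subsets; infer_instance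

-- ===== CLAIM (what is proved, stated in full; the proofs are below) =====
def Claim_equal_unequal_subsets : Prop := ∀ (lst : List Int), Dom_unequal_subsets lst → Spec_unequal_subsets lst (unequal_subsets lst)

-- ===== LEMMAS AND PROOFS =====

-- the straight-line content of A's nested loops: duplicate check against a growing set
def checkAll (st : PySem.Set Int) : List Int → Bool
  | [] => true
  | y :: ys => if PySem.Set.contains st y then false else checkAll (PySem.Set.add st y) ys

-- all non-empty subsets (by index) of a list
def nes : List Int → List (List Int)
  | [] => []
  | x :: xs => [x] :: (nes xs ++ (nes xs).map (fun c => x :: c))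

def nSums (xs : List Int) : List Int := (nes xs).map List.sum

def cross (a b : List Int) : List Int := a.flatMap (fun s => b.map (fun t => s + t))

lemma innerA_checkAll (cs : List (List Int)) (st : PySem.Set Int) (zs : List Int) :
    (match innerA st cs with
      | none => false
      | some st' => checkAll st' zs) = checkAll st (cs.map List.sum ++ zs) := by
  induction cs generalizing st with
  | nil => simp [innerA]
  | cons c cs ih =>
    simp only [innerA, List.map_cons, List.cons_append, checkAll]
    by_cases h : c.sum ∈ st
    · simp [h]
    · simp [h, ih]

lemma outerA_checkAll (lst : List Int) (rs : List Int) (st : PySem.Set Int) :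
    outerA lst st rs
      = checkAll st (rs.flatMap fun r => (combosA r.toNat lst).map List.sum) := by
  induction rs generalizing st with
  | nil => simp [outerA, checkAll]
  | cons r rs ih =>
    simp only [outerA, List.flatMap_cons]
    rw [← innerA_checkAll (combosA r.toNat lst) st
        (rs.flatMap fun r' => (combosA r'.toNat lst).map List.sum)]
    cases innerA st (combosA r.toNat lst) with
    | none => rfl
    | some st' => exact ih st'

lemma checkAll_iff (ys : List Int) (st : PySem.Set Int) :
    checkAll st ys = true ↔ ys.Nodup ∧ ∀ y ∈ ys, y ∉ st := by
  induction ys generalizing st with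
  | nil => simp [checkAll]
  | cons y ys ih =>
    simp only [checkAll]
    by_cases h : y ∈ st
    · rw [if_pos ((PySem.Set.contains_iff _ _).mpr h)]
      simp only [Bool.false_eq_true, false_iff, not_and]
      intro _ hall
      exact hall y (List.mem_cons_self) h
    · rw [if_neg (fun hc => h ((PySem.Set.contains_iff _ _).mp hc)), ih]
      simp only [List.nodup_cons]
      constructor
      · rintro ⟨hnd, hall⟩
        refine ⟨⟨fun hy => hall y hy ((PySem.Set.mem_add _ _ _).mpr (Or.inr rfl)), hnd⟩, ?_⟩
        intro z hz
        rcases List.mem_cons.mp hz with rfl | hz'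
        · exact h
        · exact fun hst => hall z hz' ((PySem.Set.mem_add _ _ _).mpr (Or.inl hst))
      · rintro ⟨⟨hy, hnd⟩, hall⟩
        refine ⟨hnd, fun z hz hmem => ?_⟩
        rcases (PySem.Set.mem_add _ _ _).mp hmem with hst | rfl
        · exact hall z (List.mem_cons_of_mem _ hz) hst
        · exact hy hz

lemma combosA_of_lt : ∀ (xs : List Int) (r : Nat), xs.length < r → combosA r xs = [] := by
  intro xs
  induction xs with
  | nil => intro r hr; cases r with | zero => omega | succ n => rfl
  | cons x xs ih =>
    intro r hr
    cases r with
    | zero => omega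
    | succ n =>
      simp only [combosA]
      simp only [List.length_cons] at hr
      rw [ih n (by omega), ih (n + 1) (by omega)]
      simp

lemma flatMap_append_perm {α β : Type} (l : List α) (f g : α → List β) :
    ((l.flatMap fun a => f a ++ g a) : Multiset β) = ↑(l.flatMap f ++ l.flatMap g) := by
  induction l with
  | nil => simp
  | cons a l ih =>
    simp only [List.flatMap_cons, ← Multiset.coe_add] at *
    rw [ih]
    abel

lemma headAllCombos (t : List Int) :
    (List.range (t.length + 1)).flatMap (fun r => combosA r t)
      = [] :: ((List.range t.length).flatMap fun k => combosA (k + 1) t) := by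
  rw [List.range_succ_eq_map]
  simp [combosA, List.flatMap_map]

lemma allCombos_perm : ∀ xs : List Int,
    ((List.range (xs.length + 1)).flatMap fun r => combosA r xs).Perm ([] :: nes xs) := by
  intro xs
  induction xs with
  | nil => simp [combosA, nes]
  | cons x t ih =>
    have htail : ((List.range t.length).flatMap fun k => combosA (k + 1) t).Perm (nes t) :=
      List.Perm.cons_inv (by rw [← headAllCombos]; exact ih)
    have hQ : ((List.range (t.length + 1)).flatMap fun k => combosA (k + 1) t)
        = (List.range t.length).flatMap fun k => combosA (k + 1) t := by
      rw [List.range_succ, List.flatMap_append]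
      simp [combosA_of_lt t (t.length + 1) (by omega)]
    have e0 : ((List.range ((x :: t).length + 1)).flatMap fun r => combosA r (x :: t))
        = [] :: ((List.range (t.length + 1)).flatMap fun k =>
            (combosA k t).map (fun c => x :: c) ++ combosA (k + 1) t) := by
      simp only [List.length_cons]
      rw [List.range_succ_eq_map]
      simp [combosA, List.flatMap_map]
    have p1 : ((List.range (t.length + 1)).flatMap fun k =>
            (combosA k t).map (fun c => x :: c) ++ combosA (k + 1) t).Perm
        (((((List.range (t.length + 1)).flatMap fun k => combosA k t)).map (fun c => x :: c))
          ++ ((List.range t.length).flatMap fun k => combosA (k + 1) t)) := by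
      refine (Multiset.coe_eq_coe.mp (flatMap_append_perm _ _ _)).trans ?_
      rw [List.map_flatMap, hQ]
    have p2 : (((((List.range (t.length + 1)).flatMap fun k => combosA k t)).map (fun c => x :: c))
          ++ ((List.range t.length).flatMap fun k => combosA (k + 1) t)).Perm
        ((([] :: nes t).map (fun c => x :: c)) ++ nes t) := List.Perm.append (ih.map _) htail
    have p3 : ((([] :: nes t).map (fun c => x :: c)) ++ nes t).Perm (nes (x :: t)) := by
      simp only [nes, List.map_cons, List.cons_append]
      exact List.Perm.cons _ List.perm_append_comm
    rw [e0]
    exact List.Perm.cons _ (p1.trans (p2.trans p3))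

lemma nSums_cons (x : Int) (xs : List Int) :
    nSums (x :: xs) = x :: (nSums xs ++ (nSums xs).map (fun s => x + s)) := by
  simp [nSums, nes, List.map_map, Function.comp_def]

lemma cross_append_left (a b S : List Int) : cross (a ++ b) S = cross a S ++ cross b S := by
  simp [cross]

lemma cross_singleton_left (x : Int) (S : List Int) : cross [x] S = S.map (fun t => x + t) := by
  simp [cross]

lemma cross_singleton_right (a : List Int) (x : Int) : cross a [x] = a.map (fun s => s + x) := by
  induction a with
  | nil => rfl
  | cons s a ih => simp [cross] at ih ⊢; exact ih

lemma cross_map_left (a : List Int) (x : Int) (S : List Int) :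
    cross (a.map (fun s => s + x)) S = cross a (S.map (fun t => x + t)) := by
  simp [cross, List.flatMap_map, List.map_map, Function.comp_def, Int.add_assoc]

lemma cross_append_right (a b c : List Int) :
    (cross a (b ++ c) : Multiset Int) = ↑(cross a b) + ↑(cross a c) := by
  have h : cross a (b ++ c)
      = a.flatMap fun s => (b.map (fun t => s + t)) ++ (c.map (fun t => s + t)) := by
    simp [cross]
  rw [h, flatMap_append_perm]
  simp [cross, Multiset.coe_add]

lemma foldl_bStep_perm : ∀ (xs : List Int) (acc : List Int),
    (↑(List.foldl bStep acc xs) : Multiset Int) = ↑(acc ++ nSums xs ++ cross acc (nSums xs)) := by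
  intro xs
  induction xs with
  | nil =>
    intro acc
    have h0 : cross acc [] = [] := by induction acc <;> simp_all [cross]
    simp [nSums, nes, h0]
  | cons x xs ih =>
    intro acc
    rw [List.foldl_cons, ih (bStep acc x)]
    have e1 : cross (bStep acc x) (nSums xs)
        = cross acc (nSums xs) ++ (nSums xs).map (fun t => x + t)
            ++ cross acc ((nSums xs).map (fun t => x + t)) := by
      rw [show bStep acc x = (acc ++ [x]) ++ acc.map (fun s => s + x) from rfl,
        cross_append_left, cross_append_left, cross_singleton_left, cross_map_left]
    have e2 : (cross acc (x :: (nSums xs ++ (nSums xs).map (fun s => x + s))) : Multiset Int)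
        = ↑(acc.map (fun s => s + x)) + ↑(cross acc (nSums xs))
            + ↑(cross acc ((nSums xs).map (fun s => x + s))) := by
      rw [show x :: (nSums xs ++ (nSums xs).map (fun s => x + s))
            = [x] ++ (nSums xs ++ (nSums xs).map (fun s => x + s)) from rfl,
        cross_append_right, cross_append_right, cross_singleton_right]
      abel
    rw [nSums_cons]
    have hsplit : (↑(acc ++ (x :: (nSums xs ++ (nSums xs).map fun s => x + s))
          ++ cross acc (x :: (nSums xs ++ (nSums xs).map fun s => x + s))) : Multiset Int)
        = ↑acc + ↑([x] ++ (nSums xs ++ (nSums xs).map fun s => x + s))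
            + ↑(cross acc (x :: (nSums xs ++ (nSums xs).map fun s => x + s))) := by
      simp [Multiset.coe_add]
    rw [hsplit, e2, e1,
      show bStep acc x = (acc ++ [x]) ++ acc.map (fun s => s + x) from rfl]
    simp only [← Multiset.coe_add, ← List.append_assoc]
    abel

-- set(xs) has as many elements as xs exactly when xs has no duplicates
lemma ofList_len_iff (xs : List Int) : (PySem.Set.ofList xs).length = xs.length ↔ xs.Nodup := by
  induction xs using List.reverseRecOn with
  | nil => simp [PySem.Set.ofList]
  | append_singleton xs x ih =>
    rw [PySem.Set.ofList_append_singleton]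
    by_cases hx : x ∈ xs
    · have hc : PySem.Set.contains (PySem.Set.ofList xs) x = true :=
        (PySem.Set.contains_iff _ _).mpr ((PySem.Set.mem_ofList _ _).mpr hx)
      simp only [PySem.Set.add, hc, if_true]
      have hle := PySem.Set.length_ofList_le (xs := xs)
      constructor
      · intro h
        simp only [List.length_append, List.length_cons, List.length_nil] at h
        exfalso; omega
      · intro h
        exact absurd rfl ((List.nodup_append.mp h).2.2 x hx x (List.mem_singleton.mpr rfl))
    · have hc : ¬ (PySem.Set.contains (PySem.Set.ofList xs) x = true) :=
        fun hcc => hx ((PySem.Set.mem_ofList _ _).mp ((PySem.Set.contains_iff _ _).mp hcc))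
      simp only [PySem.Set.add]
      rw [if_neg hc, List.length_append, List.length_append, List.nodup_append]
      simp only [List.length_cons, List.length_nil, List.nodup_cons, List.nodup_nil,
        List.not_mem_nil, not_false_iff, and_true, true_and]
      constructor
      · intro h
        refine ⟨ih.mp (by omega), ?_⟩
        intro a ha b hb
        rw [List.mem_singleton] at hb
        subst hb
        exact fun he => hx (he ▸ ha)
      · rintro ⟨h1, -⟩
        have := ih.mpr h1
        omega

-- ===== VERDICT (by name: the statement is the Claim_ definition above) =====
theorem unequal_subsets_spec : Claim_equal_unequal_subsets := by
  intro lst _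
  show unequal_subsets lst = unequal_subsets_alt lst
  have htoNat : ∀ k : Nat, ((1 : Int) + (k : Int)).toNat = k + 1 := by intro k; omega
  have hT : ((List.range lst.length).flatMap fun k => combosA (k + 1) lst).Perm (nes lst) :=
    List.Perm.cons_inv (by rw [← headAllCombos]; exact allCombos_perm lst)
  have hLA : (PySem.List.pyRange 1 ((lst.length : Int) + 1) 1).flatMap
        (fun r => (combosA r.toNat lst).map List.sum)
      = ((List.range lst.length).flatMap fun k => combosA (k + 1) lst).map List.sum := by
    rw [PySem.List.pyRange_one]
    have h1 : ((lst.length : Int) + 1 - 1).toNat = lst.length := by omega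
    rw [h1, List.flatMap_map]
    simp only [htoNat]
    rw [← List.map_flatMap]
  have hAiff : unequal_subsets lst = true ↔
      (((List.range lst.length).flatMap fun k => combosA (k + 1) lst).map List.sum).Nodup := by
    unfold unequal_subsets
    rw [outerA_checkAll, hLA, checkAll_iff]
    simp [PySem.Set.empty]
  have hsums : (List.foldl bStep [] lst).Perm (nSums lst) := by
    have h := foldl_bStep_perm lst []
    have hcross : cross [] (nSums lst) = [] := rfl
    rw [hcross] at h
    exact Multiset.coe_eq_coe.mp (by simpa using h)
  have hBiff : unequal_subsets_alt lst = true ↔ (List.foldl bStep [] lst).Nodup := by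
    unfold unequal_subsets_alt
    simp only [PySem.Set.len, beq_iff_eq, Nat.cast_inj]
    exact ofList_len_iff _
  rw [Bool.eq_iff_iff, hAiff, hBiff]
  exact ((hT.map List.sum).trans hsums.symm).nodup_iff
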